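-- pv_equiv track=rewrite | github.com/johncanthony/sorts | countSort/countSort.py | get_c_length
-- ===== SOURCE A (Python) =====
-- def get_c_length(_list):
--     """ Get the length of the C list and take into account negative numbers """
--     max_num = 0
--     min_num = 0
--
--     for each in _list:
--         if each > max_num:
--             max_num = each
--         if each < min_num:
--             min_num = each
--
--     return max_num + abs(min_num)
-- ===== SOURCE B (Python) =====
-- def get_c_length(_list):
--     """ Get the length of the C list and take into account negative numbers """
--     def hilo(seg):
--         # clamped extremes of a nonempty segment, by divide and conquer
--         if len(seg) == 1:
--             x = seg[0]
--             return (x if x > 0 else 0, x if x < 0 else 0)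
--         mid = len(seg) // 2
--         h1, l1 = hilo(seg[:mid])
--         h2, l2 = hilo(seg[mid:])
--         return (h1 if h1 > h2 else h2, l1 if l1 < l2 else l2)
--
--     if not _list:
--         return 0
--     h, l = hilo(_list)
--     return h - l
-- ===== Notes on version B (the rewrite author's own statement) =====
-- stated objective: alternative
-- what changed: Replaces A's single left-to-right loop carrying two accumulators by a divide-and-conquer recursion that splits the list in half, computes the clamped (hi, lo) pair of each half, and merges them; the span hi - lo equals A's max_num + abs(min_num).
import Mathlib
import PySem

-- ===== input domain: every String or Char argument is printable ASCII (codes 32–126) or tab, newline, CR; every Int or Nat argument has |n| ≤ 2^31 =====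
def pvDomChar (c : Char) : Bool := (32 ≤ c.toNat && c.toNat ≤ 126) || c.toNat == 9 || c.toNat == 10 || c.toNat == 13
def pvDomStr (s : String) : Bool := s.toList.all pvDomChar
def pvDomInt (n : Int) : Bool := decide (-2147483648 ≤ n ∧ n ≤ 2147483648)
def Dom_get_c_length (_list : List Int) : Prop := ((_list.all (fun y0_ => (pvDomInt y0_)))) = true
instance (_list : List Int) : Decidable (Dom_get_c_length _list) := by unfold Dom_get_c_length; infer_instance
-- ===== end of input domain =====

-- B replaces A's single accumulator loop by a divide-and-conquer recursion that
-- halves the list and merges clamped (hi, lo) pairs (alternative decomposition).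

-- ===== PORT A =====
-- literal port: one loop over the list carrying (max_num, min_num), both starting at 0
def get_c_length (_list : List Int) : Int :=
  let s := _list.foldl
    (fun (s : Int × Int) each =>
      let mx := if each > s.1 then each else s.1
      let mn := if each < s.2 then each else s.2
      (mx, mn)) (0, 0)
  s.1 + |s.2|

-- ===== PORT B =====
-- hilo(seg): clamped extremes of a nonempty segment by splitting at len//2
-- (the [] branch is unreachable: Python only calls hilo on nonempty segments)
def pvHilo : List Int → Int × Int
  | [] => (0, 0)
  | [x] => (if x > 0 then x else 0, if x < 0 then x else 0)
  | x :: y :: rest =>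
      let seg := x :: y :: rest
      let mid := seg.length / 2
      let p1 := pvHilo (seg.take mid)
      let p2 := pvHilo (seg.drop mid)
      (if p1.1 > p2.1 then p1.1 else p2.1, if p1.2 < p2.2 then p1.2 else p2.2)
  termination_by l => l.length
  decreasing_by
    · simp [List.length_take]; omega
    · simp [List.length_drop]; omega

def get_c_length_alt (_list : List Int) : Int :=
  match _list with
  | [] => 0
  | l => (pvHilo l).1 - (pvHilo l).2

-- ===== PRECONDITION & SPEC =====
def Spec_get_c_length (_list : List Int) (out : Int) : Prop := out = get_c_length_alt _list
instance (_list : List Int) (out : Int) : Decidable (Spec_get_c_length _list out) := by unfold Spec_get_c_length; infer_instance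

-- ===== CLAIM (what is proved, stated in full; the proofs are below) =====
def Claim_equal_get_c_length : Prop := ∀ (_list : List Int), Dom_get_c_length _list → Spec_get_c_length _list (get_c_length _list)

-- ===== LEMMAS AND PROOFS =====

-- A's loop is the pair of fold-reductions by max and by min
theorem foldA_eq (l : List Int) : ∀ (a b : Int),
    l.foldl (fun (s : Int × Int) each =>
      let mx := if each > s.1 then each else s.1
      let mn := if each < s.2 then each else s.2
      (mx, mn)) (a, b) = (l.foldl max a, l.foldl min b) := by
  induction l with
  | nil => intro a b; simp
  | cons x xs ih =>
      intro a b
      simp only [List.foldl_cons]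
      rw [ih]
      congr 1 <;> [skip; skip] <;> congr 1 <;> omega

theorem foldl_max_pull (l : List Int) : ∀ (a b : Int),
    max a (l.foldl max b) = l.foldl max (max a b) := by
  induction l with
  | nil => intro a b; simp
  | cons x xs ih =>
      intro a b
      simp only [List.foldl_cons]
      rw [ih]
      congr 1
      omega

theorem foldl_min_pull (l : List Int) : ∀ (a b : Int),
    min a (l.foldl min b) = l.foldl min (min a b) := by
  induction l with
  | nil => intro a b; simp
  | cons x xs ih =>
      intro a b
      simp only [List.foldl_cons]
      rw [ih]
      congr 1
      omega

theorem foldl_min_le (l : List Int) : ∀ (b : Int), l.foldl min b ≤ b := by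
  induction l with
  | nil => intro b; simp
  | cons x xs ih =>
      intro b
      simp only [List.foldl_cons]
      exact le_trans (ih _) (min_le_left _ _)

theorem foldl_max_ge (l : List Int) : ∀ (b : Int), b ≤ l.foldl max b := by
  induction l with
  | nil => intro b; simp
  | cons x xs ih =>
      intro b
      simp only [List.foldl_cons]
      exact le_trans (le_max_left _ _) (ih _)

-- the divide-and-conquer hilo computes exactly the clamped fold extremes
theorem pvHilo_eq_aux (n : Nat) : ∀ (l : List Int), l.length ≤ n → l ≠ [] →
    pvHilo l = (l.foldl max 0, l.foldl min 0) := by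
  induction n with
  | zero => intro l hl h; cases l with
      | nil => exact absurd rfl h
      | cons x xs => simp at hl
  | succ n ih =>
      intro l hl h
      match l with
      | [x] =>
          simp only [pvHilo, List.foldl_cons, List.foldl_nil, Prod.mk.injEq]
          constructor <;> split <;> omega
      | x :: y :: rest =>
          rw [pvHilo]
          have hlen : (x :: y :: rest).length = rest.length + 2 := by simp
          have hne1 : (x :: y :: rest).take ((x :: y :: rest).length / 2) ≠ [] := by
            intro hc
            have := congrArg List.length hc
            simp [List.length_take] at this
          have hne2 : (x :: y :: rest).drop ((x :: y :: rest).length / 2) ≠ [] := by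
            intro hc
            have := congrArg List.length hc
            simp [List.length_drop] at this
            omega
          have hlt1 : ((x :: y :: rest).take ((x :: y :: rest).length / 2)).length ≤ n := by
            simp [List.length_take]
            omega
          have hlt2 : ((x :: y :: rest).drop ((x :: y :: rest).length / 2)).length ≤ n := by
            simp [List.length_drop] at *
            omega
          rw [ih _ hlt1 hne1, ih _ hlt2 hne2]
          have hsplit : (x :: y :: rest).take ((x :: y :: rest).length / 2) ++
              (x :: y :: rest).drop ((x :: y :: rest).length / 2) = x :: y :: rest :=
            List.take_append_drop _ _
          set t := (x :: y :: rest).take ((x :: y :: rest).length / 2) with ht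
          set d := (x :: y :: rest).drop ((x :: y :: rest).length / 2) with hd
          have hmax : (x :: y :: rest).foldl max 0 = max (t.foldl max 0) (d.foldl max 0) := by
            rw [← hsplit, List.foldl_append]
            have h0 : (0 : Int) ≤ t.foldl max 0 := foldl_max_ge t 0
            calc d.foldl max (t.foldl max 0)
                = d.foldl max (max (t.foldl max 0) 0) := by rw [max_eq_left h0]
              _ = max (t.foldl max 0) (d.foldl max 0) := (foldl_max_pull d _ 0).symm
          have hmin : (x :: y :: rest).foldl min 0 = min (t.foldl min 0) (d.foldl min 0) := by
            rw [← hsplit, List.foldl_append]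
            have h0 : t.foldl min 0 ≤ (0 : Int) := foldl_min_le t 0
            calc d.foldl min (t.foldl min 0)
                = d.foldl min (min (t.foldl min 0) 0) := by rw [min_eq_left h0]
              _ = min (t.foldl min 0) (d.foldl min 0) := (foldl_min_pull d _ 0).symm
          rw [hmax, hmin]
          simp only [Prod.mk.injEq]
          constructor <;> split <;> omega

theorem pvHilo_eq (l : List Int) (h : l ≠ []) :
    pvHilo l = (l.foldl max 0, l.foldl min 0) :=
  pvHilo_eq_aux l.length l (le_refl _) h

-- ===== VERDICT (by name: the statement is the Claim_ definition above) =====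
theorem get_c_length_spec : Claim_equal_get_c_length := by
  intro l _
  show get_c_length l = get_c_length_alt l
  cases l with
  | nil => rfl
  | cons x xs =>
      have halt : get_c_length_alt (x :: xs) = (pvHilo (x :: xs)).1 - (pvHilo (x :: xs)).2 := rfl
      rw [halt]
      unfold get_c_length
      rw [foldA_eq, pvHilo_eq _ (by simp)]
      have hmn : (x :: xs).foldl min 0 ≤ 0 := foldl_min_le _ 0
      simp only []
      rw [abs_of_nonpos hmn]
      ring
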